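-- pv_equiv track=rewrite | github.com/weightan/v2v1 | ortconrule.py | find_all_small_regions
-- ===== SOURCE A (Python) =====
-- def find_all_small_regions(s):
--     out = []
--     pops = set(i[0] for i in s)
--     if len(pops) == 1:
--         return out
--     minn = min(pops)
--     for i in s:
--         if i[0] == minn:
--             out.extend(i[1])
--     return out
-- ===== SOURCE B (Python) =====
-- def find_all_small_regions(s):
--     groups = {}
--     for pop, payload in s:
--         groups.setdefault(pop, []).extend(payload)
--     if len(groups) == 1:
--         return []
--     return groups[min(groups)]
-- ===== Notes on version B (the rewrite author's own statement) =====
-- stated objective: alternative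
-- what changed: B groups payloads per population in one dict-building pass and then selects the minimum key's concatenated payload, instead of A's set-build + min + second filtering scan over the input.
import Mathlib
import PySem

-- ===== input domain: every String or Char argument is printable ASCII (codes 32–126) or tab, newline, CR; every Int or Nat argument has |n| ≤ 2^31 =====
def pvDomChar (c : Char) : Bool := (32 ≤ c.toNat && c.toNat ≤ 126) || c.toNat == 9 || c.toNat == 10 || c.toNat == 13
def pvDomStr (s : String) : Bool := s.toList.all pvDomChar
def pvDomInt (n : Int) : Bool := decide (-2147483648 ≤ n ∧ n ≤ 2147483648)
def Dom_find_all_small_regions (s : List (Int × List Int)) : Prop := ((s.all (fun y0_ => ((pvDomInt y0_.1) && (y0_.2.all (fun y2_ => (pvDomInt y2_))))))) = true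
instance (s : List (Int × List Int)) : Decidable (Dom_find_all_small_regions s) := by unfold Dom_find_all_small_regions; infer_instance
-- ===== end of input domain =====

-- B replaces A's set-build + min + second filtering scan by a single grouping pass into a
-- dict plus a lookup of the minimum key; same cost, different shape (alternative).

-- ===== PORT A =====
def find_all_small_regions (s : List (Int × List Int)) : List Int :=
  let out : List Int := []
  let pops : PySem.Set Int := PySem.Set.ofList (s.map (fun i => i.1))
  if pops.length = 1 then out
  else
    -- Pre_ gives s ≠ [], so min? is some; getD 0 only totalises
    let minn : Int := (PySem.List.min? pops (fun x => x)).getD 0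
    s.foldl (fun out i => if i.1 = minn then out ++ i.2 else out) out

-- ===== PORT B =====
def find_all_small_regions_alt (s : List (Int × List Int)) : List Int :=
  let groups : PySem.Dict Int (List Int) :=
    s.foldl (fun g i => g.insert i.1 (g.getD i.1 [] ++ i.2)) PySem.Dict.empty
  if groups.size = 1 then []
  else
    -- Pre_ gives s ≠ [], so min? is some; getD 0 only totalises
    groups.getD ((PySem.List.min? groups.keys (fun x => x)).getD 0) []

-- ===== PRECONDITION & SPEC =====
-- Pre_ excludes only the empty list, on which both A and B raise ValueError (min of an empty collection).
def Pre_find_all_small_regions (s : List (Int × List Int)) : Prop := s ≠ []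
instance (s : List (Int × List Int)) : Decidable (Pre_find_all_small_regions s) := by unfold Pre_find_all_small_regions; infer_instance
def pvWitness_find_all_small_regions : (List (Int × List Int)) := [(2, [7, 8]), (1, [3]), (1, [4])]

def Spec_find_all_small_regions (s : List (Int × List Int)) (out : List Int) : Prop := out = find_all_small_regions_alt s
instance (s : List (Int × List Int)) (out : List Int) : Decidable (Spec_find_all_small_regions s out) := by unfold Spec_find_all_small_regions; infer_instance

-- ===== CLAIM (what is proved, stated in full; the proofs are below) =====
def Claim_equal_find_all_small_regions : Prop := ∀ (s : List (Int × List Int)), Dom_find_all_small_regions s → Pre_find_all_small_regions s → Spec_find_all_small_regions s (find_all_small_regions s)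

-- ===== LEMMAS AND PROOFS =====

-- keys of B's grouping dict are exactly A's set of populations, in the same (first-encounter) order
lemma groups_keys (s : List (Int × List Int)) (g : PySem.Dict Int (List Int)) :
    (s.foldl (fun g i => g.insert i.1 (g.getD i.1 [] ++ i.2)) g).keys
      = PySem.Set.update g.keys (s.map (fun i => i.1)) := by
  induction s generalizing g with
  | nil => rfl
  | cons x t ih =>
      simp only [List.foldl_cons, List.map_cons, PySem.Set.update_cons, ih]
      congr 1
      by_cases h : g.contains x.1
      · rw [PySem.Dict.keys_insert_of_contains _ _ h,
            PySem.Set.add_of_mem ((PySem.Dict.contains_iff_mem_keys _ _).mp h)]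
      · rw [PySem.Dict.keys_insert_of_not_contains _ _ (by simpa using h),
            PySem.Set.add_of_not_mem (fun hm => h ((PySem.Dict.contains_iff_mem_keys _ _).mpr hm))]

-- looking up a key in B's grouping dict yields the filtered concatenation A's second loop builds
lemma groups_getD (s : List (Int × List Int)) (g : PySem.Dict Int (List Int)) (k : Int) :
    (s.foldl (fun g i => g.insert i.1 (g.getD i.1 [] ++ i.2)) g).getD k []
      = s.foldl (fun out i => if i.1 = k then out ++ i.2 else out) (g.getD k []) := by
  induction s generalizing g with
  | nil => rfl
  | cons x t ih =>
      simp only [List.foldl_cons, ih, PySem.Dict.getD_insert]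
      by_cases h : k = x.1
      · simp [h]
      · simp [h, Ne.symm h]

-- ===== VERDICT (by name: the statement is the Claim_ definition above) =====
-- Set.update is the fold of Set.add; from the empty set it is exactly Set.ofList
-- (bridges B's key list to A's pops set)
lemma set_update_eq_foldl (xs : List Int) (s : PySem.Set Int) :
    PySem.Set.update s xs = xs.foldl PySem.Set.add s := by
  induction xs generalizing s with
  | nil => rfl
  | cons x t ih => rw [PySem.Set.update_cons, List.foldl_cons, ih]

lemma set_update_nil_eq_ofList (xs : List Int) :
    PySem.Set.update ([] : PySem.Set Int) xs = PySem.Set.ofList xs := by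
  rw [PySem.Set.ofList_eq_foldl, set_update_eq_foldl]

-- a dict's size is the length of its key list
lemma dict_size_eq_keys_length (d : PySem.Dict Int (List Int)) :
    d.size = d.keys.length := by
  simp [PySem.Dict.size, PySem.Dict.keys]

theorem find_all_small_regions_spec : Claim_equal_find_all_small_regions := by
  intro s _ _
  unfold Spec_find_all_small_regions find_all_small_regions find_all_small_regions_alt
  simp only [dict_size_eq_keys_length, groups_keys, groups_getD, PySem.Dict.keys_empty,
    PySem.Dict.getD_empty, set_update_nil_eq_ofList]
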